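-- pv_equiv track=rewrite | github.com/davidcornett/BeerMapr | coordinates.py | process_x
-- ===== SOURCE A (Python) =====
-- def process_x(x: str) -> str:
--     output = ''
--     switch = False
--     for char in x:
--         if char == ',':
--             switch = True
--         else:
--             if switch is True:
--                 output += char
--     return output
-- ===== SOURCE B (Python) =====
-- def process_x(x: str) -> str:
--     idx = x.find(',')
--     if idx == -1:
--         return ''
--     return x[idx + 1:].replace(',', '')
-- ===== Notes on version B (the rewrite author's own statement) =====
-- stated objective: faster
-- what changed: Replaces the per-character stateful loop (switch flag + string concatenation) by locating the first comma with find, slicing the tail, and deleting remaining commas with replace.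
import Mathlib
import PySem

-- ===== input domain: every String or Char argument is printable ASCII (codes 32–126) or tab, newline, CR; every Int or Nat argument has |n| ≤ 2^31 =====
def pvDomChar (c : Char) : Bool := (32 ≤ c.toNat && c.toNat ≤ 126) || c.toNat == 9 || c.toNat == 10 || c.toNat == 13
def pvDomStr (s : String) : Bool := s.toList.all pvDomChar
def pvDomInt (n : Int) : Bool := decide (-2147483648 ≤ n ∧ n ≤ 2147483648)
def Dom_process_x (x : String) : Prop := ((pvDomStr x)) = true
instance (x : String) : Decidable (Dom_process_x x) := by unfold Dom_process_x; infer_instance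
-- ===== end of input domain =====

-- B replaces A's per-character switch/accumulator loop by find-the-first-comma, slice the tail, replace remaining commas (measured faster in a timing run).

-- ===== PORT A =====
-- one loop step of A: on ',' set the switch; otherwise append the char iff the switch is on
def pxStep (s : List Char × Bool) (c : Char) : List Char × Bool :=
  if c = ',' then (s.1, true)
  else if s.2 = true then (s.1 ++ [c], s.2) else s

def process_x (x : String) : String :=
  String.ofList (x.toList.foldl pxStep ([], false)).1

-- ===== PORT B =====
def process_x_alt (x : String) : String :=
  let idx := PySem.Str.find x ","
  if idx = -1 then ""
  else PySem.Str.replace (PySem.Str.slice x (some (idx + 1)) none) "," ""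

-- ===== PRECONDITION & SPEC =====
def Spec_process_x (x : String) (out : String) : Prop := out = process_x_alt x
instance (x : String) (out : String) : Decidable (Spec_process_x x out) := by unfold Spec_process_x; infer_instance

-- ===== CLAIM (what is proved, stated in full; the proofs are below) =====
def Claim_equal_process_x : Prop := ∀ (x : String), Dom_process_x x → Spec_process_x x (process_x x)

-- ===== LEMMAS AND PROOFS =====

-- once the switch is on, A appends exactly the non-comma chars
theorem pxStep_true (cs : List Char) : ∀ out : List Char,
    cs.foldl pxStep (out, true) = (out ++ cs.filter (· ≠ ','), true) := by
  induction cs with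
  | nil => intro out; simp
  | cons c cs ih =>
      intro out
      by_cases h : c = ','
      · simp [pxStep, h, ih]
      · simp [pxStep, h, ih]

-- replace s "," "" deletes the commas
theorem replace_go_filter (cs : List Char) : ∀ (fuel : Nat) (acc : List Char),
    cs.length ≤ fuel →
    PySem.Chars.replace.go [','] [] fuel cs acc = acc.reverse ++ cs.filter (· ≠ ',') := by
  induction cs with
  | nil =>
      intro fuel acc _
      cases fuel <;> simp [PySem.Chars.replace.go]
  | cons c cs ih =>
      intro fuel acc hf
      cases fuel with
      | zero => simp at hf
      | succ fuel =>
          by_cases h : c = ','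
          · have hb : (',' == c) = true := by simp [h]
            simp [PySem.Chars.replace.go, List.isPrefixOf, h,
              ih fuel acc (by simpa using hf)]
          · have hb : (',' == c) = false := by simp [Ne.symm h]
            simp [PySem.Chars.replace.go, List.isPrefixOf, hb, h,
              ih fuel (c :: acc) (by simpa using hf)]

theorem replace_filter (cs : List Char) :
    PySem.Chars.replace cs [','] [] = cs.filter (· ≠ ',') := by
  simpa [PySem.Chars.replace] using replace_go_filter cs cs.length [] le_rfl

-- find.go with the single-char needle [','] returns k + index of the first comma
theorem find_go_comma (cs : List Char) : ∀ k : Nat,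
    PySem.Chars.find.go [','] cs k =
      if ',' ∈ cs then ((k + cs.idxOf ',' : Nat) : Int) else -1 := by
  induction cs with
  | nil => intro k; simp [PySem.Chars.find.go]
  | cons c cs ih =>
      intro k
      by_cases h : c = ','
      · have hb : (',' == c) = true := by simp [h]
        simp [PySem.Chars.find.go, List.isPrefixOf, h]
      · have hb : (',' == c) = false := by simp [Ne.symm h]
        have hstep : PySem.Chars.find.go [','] (c :: cs) k
            = PySem.Chars.find.go [','] cs (k + 1) := by
          simp [PySem.Chars.find.go, List.isPrefixOf, hb]
        have hb2 : (c == ',') = false := by simp [h]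
        rw [hstep, ih (k + 1)]
        by_cases hm : ',' ∈ cs
        · simp only [List.mem_cons, hm, or_true, if_true, List.idxOf_cons, hb2,
            Bool.cond_eq_ite, Bool.false_eq_true, if_false]
          push_cast
          ring
        · rw [if_neg hm, if_neg (by simp [hm, Ne.symm h])]

-- the main list-level fact: A's loop result, characterised by B's shape
theorem main_list (cs : List Char) :
    (cs.foldl pxStep ([], false)).1 =
      if ',' ∈ cs then PySem.Chars.replace (cs.drop (cs.idxOf ',' + 1)) [','] []
      else [] := by
  induction cs with
  | nil => simp
  | cons c cs ih =>
      by_cases h : c = ','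
      · have hb : (',' == c) = true := by simp [h]
        have h1 : (List.foldl pxStep ([], false) (c :: cs)).1
            = cs.filter (· ≠ ',') := by
          rw [List.foldl_cons]
          have hs : pxStep ([], false) c = ([], true) := by simp [pxStep, h]
          rw [hs, pxStep_true cs []]
          simp
        rw [h1, if_pos (by simp [h])]
        have hb2 : (c == ',') = true := by simp [h]
        simp only [List.idxOf_cons, hb2, Bool.cond_eq_ite, if_true]
        simp [replace_filter]
      · have hb : (',' == c) = false := by simp [Ne.symm h]
        have h1 : (List.foldl pxStep ([], false) (c :: cs)).1
            = (List.foldl pxStep ([], false) cs).1 := by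
          rw [List.foldl_cons]
          have hs : pxStep ([], false) c = ([], false) := by simp [pxStep, h]
          rw [hs]
        have hb2 : (c == ',') = false := by simp [h]
        rw [h1, ih]
        by_cases hm : ',' ∈ cs
        · simp only [List.mem_cons, hm, or_true, if_true, List.idxOf_cons, hb2,
            Bool.cond_eq_ite, Bool.false_eq_true, if_false, List.drop_succ_cons]
        · rw [if_neg hm, if_neg (by simp [hm, Ne.symm h])]

-- ===== VERDICT (by name: the statement is the Claim_ definition above) =====
theorem process_x_spec : Claim_equal_process_x := by
  unfold Claim_equal_process_x
  intro x _
  unfold Spec_process_x process_x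
  simp only [process_x_alt]
  have hcomma : ("," : String).toList = [','] := rfl
  have hfind : PySem.Str.find x ","
      = if ',' ∈ x.toList then ((0 + x.toList.idxOf ',' : Nat) : Int) else -1 := by
    rw [PySem.Str.find, hcomma, PySem.Chars.find, find_go_comma]
  rw [main_list, hfind]
  by_cases hm : ',' ∈ x.toList
  · rw [if_pos hm, if_pos hm, if_neg (by omega)]
    rw [PySem.Str.replace, PySem.Str.slice, hcomma]
    have hcast : ((0 + x.toList.idxOf ',' : Nat) : Int) + 1
        = ((x.toList.idxOf ',' + 1 : Nat) : Int) := by push_cast; ring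
    rw [hcast, PySem.Chars.slice, PySem.List.slice_from_natCast]
    simp
  · rw [if_neg hm, if_neg hm, if_pos rfl]
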